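-- pv_equiv track=rewrite | github.com/peterostrander2/bookie-member-app | backend/live_data_router.py | cipher_reduction
-- ===== SOURCE A (Python) =====
-- def cipher_reduction(text: str) -> int:
--     """Reduction/Pythagorean: Reduce to single digits (purest form)"""
--     total = 0
--     for c in (text or "").upper():
--         if 65 <= ord(c) <= 90:
--             val = ord(c) - 64
--             while val > 9:
--                 val = sum(int(d) for d in str(val))
--             total += val
--     return total
-- ===== SOURCE B (Python) =====
-- def cipher_reduction(text: str) -> int:
--     """Reduction/Pythagorean: digital root via closed form 1 + (val-1) % 9."""
--     total = 0
--     for c in (text or "").upper():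
--         if 65 <= ord(c) <= 90:
--             total += 1 + (ord(c) - 65) % 9
--     return total
-- ===== Notes on version B (the rewrite author's own statement) =====
-- stated objective: simpler
-- what changed: Replaces A's inner while loop that repeatedly re-stringifies the value and sums its digits with the digital-root closed form 1 + (val-1) % 9, keeping the same single scan.
import Mathlib
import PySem

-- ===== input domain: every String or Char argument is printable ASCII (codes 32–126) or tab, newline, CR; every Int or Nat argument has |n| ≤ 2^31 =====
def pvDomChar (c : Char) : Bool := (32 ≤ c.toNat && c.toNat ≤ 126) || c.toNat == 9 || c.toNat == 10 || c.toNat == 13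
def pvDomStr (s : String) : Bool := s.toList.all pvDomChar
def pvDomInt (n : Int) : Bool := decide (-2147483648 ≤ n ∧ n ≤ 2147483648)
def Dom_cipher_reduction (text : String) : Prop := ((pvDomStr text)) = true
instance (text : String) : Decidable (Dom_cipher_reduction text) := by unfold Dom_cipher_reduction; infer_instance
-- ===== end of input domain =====

-- B replaces A's inner digit-summing while loop with the digital-root closed form 1 + (val-1) % 9 (simpler, same single scan).
-- ===== PORT A =====
-- sum(int(d) for d in str(val))
def pvDigitSum (val : Int) : Int :=
  ((PySem.Int.toStr val).toList.map
    (fun d => (PySem.Int.ofStr? (String.ofList [d])).getD 0)).sum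

-- the 'while val > 9' loop; fuel is only a totality guard (val.toNat steps always suffice for the vals A feeds in, 1..26)
def pvReduceLoop : Nat → Int → Int
  | 0, val => val
  | fuel + 1, val => if val > 9 then pvReduceLoop fuel (pvDigitSum val) else val

def cipher_reduction (text : String) : Int :=
  (PySem.Str.upper text).toList.foldl
    (fun total c =>
      if 65 ≤ (c.toNat : Int) ∧ (c.toNat : Int) ≤ 90 then
        total + pvReduceLoop ((c.toNat : Int) - 64).toNat ((c.toNat : Int) - 64)
      else total) 0

-- ===== PORT B =====
def cipher_reduction_alt (text : String) : Int :=
  (PySem.Str.upper text).toList.foldl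
    (fun total c =>
      if 65 ≤ (c.toNat : Int) ∧ (c.toNat : Int) ≤ 90 then
        total + (1 + PySem.Int.mod ((c.toNat : Int) - 65) 9)
      else total) 0

-- ===== PRECONDITION & SPEC =====
def Spec_cipher_reduction (text : String) (out : Int) : Prop := out = cipher_reduction_alt text
instance (text : String) (out : Int) : Decidable (Spec_cipher_reduction text out) := by unfold Spec_cipher_reduction; infer_instance

-- ===== CLAIM (what is proved, stated in full; the proofs are below) =====
def Claim_equal_cipher_reduction : Prop := ∀ (text : String), Dom_cipher_reduction text → Spec_cipher_reduction text (cipher_reduction text)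

-- ===== LEMMAS AND PROOFS =====

-- ===== VERDICT (by name: the statement is the Claim_ definition above) =====
-- per-letter: A's while-loop reduction equals B's closed form, for every letter code 65..90
theorem pvStep_eq (n : Nat) (h1 : 65 ≤ n) (h2 : n ≤ 90) :
    pvReduceLoop ((n : Int) - 64).toNat ((n : Int) - 64)
      = 1 + PySem.Int.mod ((n : Int) - 65) 9 := by
  interval_cases n <;> decide

theorem pvFold_eq (l : List Char) (t : Int) :
    l.foldl
      (fun total c =>
        if 65 ≤ (c.toNat : Int) ∧ (c.toNat : Int) ≤ 90 then
          total + pvReduceLoop ((c.toNat : Int) - 64).toNat ((c.toNat : Int) - 64)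
        else total) t
    = l.foldl
      (fun total c =>
        if 65 ≤ (c.toNat : Int) ∧ (c.toNat : Int) ≤ 90 then
          total + (1 + PySem.Int.mod ((c.toNat : Int) - 65) 9)
        else total) t := by
  induction l generalizing t with
  | nil => rfl
  | cons c cs ih =>
    simp only [List.foldl]
    split_ifs with h
    · rw [pvStep_eq c.toNat (by exact_mod_cast h.1) (by exact_mod_cast h.2)]
      exact ih _
    · exact ih t

theorem cipher_reduction_spec : Claim_equal_cipher_reduction := by
  intro text _
  unfold Spec_cipher_reduction cipher_reduction cipher_reduction_alt
  exact pvFold_eq _ 0
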